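-- pv_equiv track=rewrite | github.com/phuayj/biohackathon-germany-2025 | src/nerve/loader/sources/hpo_siblings.py | _build_sibling_map_from_ancestors
-- ===== SOURCE A (Python) =====
-- def _build_sibling_map_from_ancestors(
--     ancestor_map: dict[str, list[str]],
-- ) -> dict[str, list[str]]:
--     """Build sibling map from ancestor map."""
--     ancestor_sets: dict[str, set[str]] = {
--         hp_id: set(ancestors) for hp_id, ancestors in ancestor_map.items()
--     }
--
--     sibling_map: dict[str, list[str]] = {hp_id: [] for hp_id in ancestor_map}
--     ids = list(ancestor_map.keys())
--
--     for i, hp_i in enumerate(ids):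
--         anc_i = ancestor_sets.get(hp_i)
--         if not anc_i:
--             continue
--         for j in range(i + 1, len(ids)):
--             hp_j = ids[j]
--             anc_j = ancestor_sets.get(hp_j)
--             if not anc_j:
--                 continue
--             if anc_i & anc_j:  # Shared ancestors
--                 sibling_map[hp_i].append(hp_j)
--                 sibling_map.setdefault(hp_j, []).append(hp_i)
--
--     return sibling_map
-- ===== SOURCE B (Python) =====
-- def _build_sibling_map_from_ancestors(ancestor_map):
--     """Build sibling map from ancestor map (inverted ancestor->nodes index)."""
--     ids = list(ancestor_map)
--     pos = {h: i for i, h in enumerate(ids)}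
--     groups = {}
--     for h, ancestors in ancestor_map.items():
--         for a in ancestors:
--             groups.setdefault(a, []).append(pos[h])
--     sib = [set() for _ in ids]
--     for members in groups.values():
--         mset = set(members)
--         for x in members:
--             sib[x] |= mset
--     return {h: [ids[j] for j in sorted(sib[i] - {i})] for i, h in enumerate(ids)}
-- ===== Notes on version B (the rewrite author's own statement) =====
-- stated objective: faster
-- what changed: Replaces A's all-pairs double loop with per-pair ancestor-set intersection by an inverted ancestor-to-node-positions index whose groups are unioned into per-node sibling sets, each row then emitted sorted by original insertion position.
import Mathlib
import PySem

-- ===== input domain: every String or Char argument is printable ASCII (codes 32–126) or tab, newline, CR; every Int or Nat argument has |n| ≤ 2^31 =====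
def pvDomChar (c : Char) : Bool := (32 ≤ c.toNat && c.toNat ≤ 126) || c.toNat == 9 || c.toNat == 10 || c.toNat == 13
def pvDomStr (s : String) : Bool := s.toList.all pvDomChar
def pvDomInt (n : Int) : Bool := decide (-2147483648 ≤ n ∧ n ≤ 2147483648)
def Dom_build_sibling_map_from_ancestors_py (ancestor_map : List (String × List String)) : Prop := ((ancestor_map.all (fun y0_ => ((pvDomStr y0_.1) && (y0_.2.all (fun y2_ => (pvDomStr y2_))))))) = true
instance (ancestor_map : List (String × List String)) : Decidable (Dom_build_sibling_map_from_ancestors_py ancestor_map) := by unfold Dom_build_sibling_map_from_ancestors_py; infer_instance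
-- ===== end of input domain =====

-- B replaces A's all-pairs ancestor-set-intersection double loop by an inverted ancestor→node-indices
-- index whose groups are unioned into per-node sibling sets (objective: faster; measured in a timing run).

-- ===== PORT A =====
-- A-side helpers: the dict comprehensions and the two nested loops of the Python, as named folds.
def portA_ancestor_sets (am : PySem.Dict String (List String)) : PySem.Dict String (PySem.Set String) :=
  am.items.foldl (fun d p => d.insert p.1 (PySem.Set.ofList p.2)) PySem.Dict.empty

def portA_init (am : PySem.Dict String (List String)) : PySem.Dict String (List String) :=
  am.keys.foldl (fun d k => d.insert k ([] : List String)) PySem.Dict.empty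

def portA_inner (ancestor_sets : PySem.Dict String (PySem.Set String)) (ids : List String)
    (anc_i : PySem.Set String) (hp_i : String)
    (sm : PySem.Dict String (List String)) (j : Nat) : PySem.Dict String (List String) :=
  match ancestor_sets.get? (ids.getD j "") with
  | none => sm
  | some anc_j =>
    if anc_j.isEmpty then sm else
    if (PySem.Set.inter anc_i anc_j).isEmpty then sm else
    ((sm.modify hp_i [] (· ++ [ids.getD j ""])).setdefault (ids.getD j "") []).modify
      (ids.getD j "") [] (· ++ [hp_i])

def portA_outer (ancestor_sets : PySem.Dict String (PySem.Set String)) (ids : List String) (n : Nat)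
    (sm : PySem.Dict String (List String)) (i : Nat) : PySem.Dict String (List String) :=
  match ancestor_sets.get? (ids.getD i "") with
  | none => sm
  | some anc_i =>
    if anc_i.isEmpty then sm else
    (List.range' (i + 1) (n - (i + 1))).foldl
      (portA_inner ancestor_sets ids anc_i (ids.getD i "")) sm

def build_sibling_map_from_ancestors_py (ancestor_map : List (String × List String)) : List (String × List String) :=
  let am : PySem.Dict String (List String) := PySem.Dict.ofList ancestor_map
  let ancestor_sets := portA_ancestor_sets am
  let sibling_map0 := portA_init am
  let ids : List String := am.keys
  let n : Nat := ids.length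
  ((List.range n).foldl (portA_outer ancestor_sets ids n) sibling_map0).items

-- ===== PORT B =====
-- B-side helpers: position index, inverted ancestor→positions index, per-group sibling-set union.
def portB_pos (ids : List String) : PySem.Dict String Nat :=
  (List.range ids.length).foldl (fun d i => d.insert (ids.getD i "") i) PySem.Dict.empty

def portB_groups (pos : PySem.Dict String Nat) (items : List (String × List String)) :
    PySem.Dict String (List Nat) :=
  items.foldl (fun g p =>
    p.2.foldl (fun g a => (g.setdefault a []).modify a [] (· ++ [pos.getD p.1 0])) g) PySem.Dict.empty

def portB_sibStep (sb : List (PySem.Set Nat)) (members : List Nat) : List (PySem.Set Nat) :=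
  members.foldl
    (fun sb x => sb.set x (PySem.Set.union (sb.getD x PySem.Set.empty) (PySem.Set.ofList members))) sb

def build_sibling_map_from_ancestors_py_alt (ancestor_map : List (String × List String)) : List (String × List String) :=
  let am : PySem.Dict String (List String) := PySem.Dict.ofList ancestor_map
  let ids : List String := am.keys
  let pos := portB_pos ids
  let groups := portB_groups pos am.items
  let sib0 : List (PySem.Set Nat) := ids.map (fun _ => PySem.Set.empty)
  let sib := groups.values.foldl portB_sibStep sib0
  (List.range ids.length).map (fun i =>
    (ids.getD i "",
     (PySem.List.sorted (PySem.Set.diff (sib.getD i PySem.Set.empty) [i]) (fun x => x) false).map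
       (fun j => ids.getD j "")))

-- ===== PRECONDITION & SPEC =====
def Spec_build_sibling_map_from_ancestors_py (ancestor_map : List (String × List String)) (out : List (String × List String)) : Prop := out = build_sibling_map_from_ancestors_py_alt ancestor_map
instance (ancestor_map : List (String × List String)) (out : List (String × List String)) : Decidable (Spec_build_sibling_map_from_ancestors_py ancestor_map out) := by unfold Spec_build_sibling_map_from_ancestors_py; infer_instance

-- ===== CLAIM (what is proved, stated in full; the proofs are below) =====
def Claim_equal_build_sibling_map_from_ancestors_py : Prop := ∀ (ancestor_map : List (String × List String)), Dom_build_sibling_map_from_ancestors_py ancestor_map → Spec_build_sibling_map_from_ancestors_py ancestor_map (build_sibling_map_from_ancestors_py ancestor_map)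

-- ===== LEMMAS AND PROOFS =====

-- Abbreviations for the proof: the key list, its length, the ancestor set of the i-th key,
-- and the Boolean "shares an ancestor" relation on key positions.
def pvKeys (am : List (String × List String)) : List String := (PySem.Dict.ofList am).keys
def pvN (am : List (String × List String)) : Nat := (pvKeys am).length
def pvAnc (am : List (String × List String)) (i : Nat) : PySem.Set String :=
  PySem.Set.ofList ((PySem.Dict.ofList am).getD ((pvKeys am).getD i "") [])
def pvSharesB (am : List (String × List String)) (x j : Nat) : Bool :=
  (pvAnc am x).any (fun a => (pvAnc am j).contains a)
-- Row of x after: all pairs {u,v} with min < i processed, plus pairs with min = i and max < m.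
def pvP (am : List (String × List String)) (i m x j : Nat) : Bool :=
  !(j == x) && pvSharesB am x j && (decide (min x j < i) || (decide (min x j = i) && decide (max x j < m)))
def pvRow (am : List (String × List String)) (i m x : Nat) : List String :=
  ((List.range (pvN am)).filter (pvP am i m x)).map (fun j => (pvKeys am).getD j "")
def pvFinP (am : List (String × List String)) (x j : Nat) : Bool := !(j == x) && pvSharesB am x j
def pvFinRow (am : List (String × List String)) (x : Nat) : List String :=
  ((List.range (pvN am)).filter (pvFinP am x)).map (fun j => (pvKeys am).getD j "")
def pvSpecOut (am : List (String × List String)) : List (String × List String) :=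
  (List.range (pvN am)).map (fun i => ((pvKeys am).getD i "", pvFinRow am i))

-- generic list lemmas
theorem pv_map_range_getD {α β : Type} (xs : List α) (f : α → β) (d : α) :
    xs.map f = (List.range xs.length).map (fun i => f (xs.getD i d)) := by
  apply List.ext_getElem
  · simp
  · intro i h1 h2
    simp [List.getD_eq_getElem?_getD, List.getElem?_eq_getElem (by simpa using h2)]

theorem pv_filter_range_congr {n : Nat} {P Q : Nat → Bool} (h : ∀ k, k < n → P k = Q k) :
    (List.range n).filter P = (List.range n).filter Q :=
  List.filter_congr (by intro x hx; simpa using h x (List.mem_range.mp hx))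

theorem pv_filter_range_snoc {n j : Nat} {P Q : Nat → Bool} (hj : j < n) (hQj : Q j = true)
    (hPj : P j = false) (hagree : ∀ k, k ≠ j → P k = Q k) (hlt : ∀ k, P k = true → k < j) :
    (List.range n).filter Q = (List.range n).filter P ++ [j] := by
  induction n with
  | zero => omega
  | succ n ih =>
    rw [List.range_succ, List.filter_append, List.filter_append]
    by_cases hnj : n = j
    · subst hnj
      have hPQ : (List.range n).filter P = (List.range n).filter Q :=
        pv_filter_range_congr (fun k hk => hagree k (by omega))
      simp [hQj, hPj, hPQ]
    · have hPn : P n = false := by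
        cases h : P n with
        | false => rfl
        | true => exact absurd (hlt n h) (by omega)
      have hQn : Q n = false := by rw [← hagree n hnj]; exact hPn
      simp [hPn, hQn, ih (by omega)]

theorem pv_getD_set_ne {α : Type} (l : List α) (i : Nat) (v d : α) (j : Nat) (hj : j ≠ i) :
    (l.set i v).getD j d = l.getD j d := by
  simp [List.getD_eq_getElem?_getD, List.getElem?_set_ne (by omega : i ≠ j)]

theorem pv_getD_set_self {α : Type} (l : List α) (i : Nat) (v d : α) (h : i < l.length) :
    (l.set i v).getD i d = v := by
  simp [List.getD_eq_getElem?_getD, h]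

-- facts about the shared structure
theorem pvKeys_nodup (am : List (String × List String)) : (pvKeys am).Nodup :=
  PySem.Dict.nodup_keys_ofList am

theorem pvKeys_getD_inj (am : List (String × List String)) {x y : Nat} (hx : x < pvN am)
    (hy : y < pvN am) (h : (pvKeys am).getD x "" = (pvKeys am).getD y "") : x = y := by
  have hx' := hx; have hy' := hy
  unfold pvN at hx' hy'
  rw [List.getD_eq_getElem _ _ hx', List.getD_eq_getElem _ _ hy'] at h
  exact (List.Nodup.getElem_inj_iff (pvKeys_nodup am)).mp h

theorem pv_items_eq (am : List (String × List String)) :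
    (PySem.Dict.ofList am).items =
      (List.range (pvN am)).map (fun i => ((pvKeys am).getD i "", (PySem.Dict.ofList am).getD ((pvKeys am).getD i "") [])) := by
  have h := PySem.Dict.items_eq_map_keys (PySem.Dict.ofList am) (pvKeys_nodup am) []
  rw [h]
  exact pv_map_range_getD (pvKeys am) _ ""

theorem pv_ancSets_get? (am : List (String × List String)) {i : Nat} (hi : i < pvN am) :
    (portA_ancestor_sets (PySem.Dict.ofList am)).get? ((pvKeys am).getD i "") = some (pvAnc am i) := by
  have hnd : (pvKeys am).Nodup := pvKeys_nodup am
  have hfresh : ∀ p ∈ (PySem.Dict.ofList am).items,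
      (PySem.Dict.empty : PySem.Dict String (PySem.Set String)).contains p.1 = false := by
    intro p _; simp [PySem.Dict.contains_empty]
  have hmapnd : ((PySem.Dict.ofList am).items.map (fun p => p.1)).Nodup := hnd
  have hitems : (portA_ancestor_sets (PySem.Dict.ofList am)).items =
      (PySem.Dict.ofList am).items.map (fun p => (p.1, PySem.Set.ofList p.2)) := by
    unfold portA_ancestor_sets
    rw [PySem.Dict.items_foldl_insert_fresh _ _ _ _ hfresh hmapnd]
    rfl
  have hmem : ((pvKeys am).getD i "", pvAnc am i) ∈ (portA_ancestor_sets (PySem.Dict.ofList am)).items := by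
    rw [hitems]
    refine List.mem_map.mpr ⟨((pvKeys am).getD i "", (PySem.Dict.ofList am).getD ((pvKeys am).getD i "") []), ?_, rfl⟩
    rw [pv_items_eq am]
    exact List.mem_map.mpr ⟨i, List.mem_range.mpr hi, rfl⟩
  have hASkeys : (portA_ancestor_sets (PySem.Dict.ofList am)).keys.Nodup := by
    show ((portA_ancestor_sets (PySem.Dict.ofList am)).items.map (fun p => p.1)).Nodup
    rw [hitems]
    simpa [List.map_map, Function.comp] using hnd
  exact PySem.Dict.get?_of_mem_items _ hmem hASkeys

theorem pvSharesB_iff (am : List (String × List String)) (x j : Nat) :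
    pvSharesB am x j = true ↔ ∃ a, a ∈ pvAnc am x ∧ a ∈ pvAnc am j := by
  simp [pvSharesB, List.any_eq_true]

theorem pvSharesB_symm (am : List (String × List String)) (x j : Nat) :
    pvSharesB am x j = pvSharesB am j x := by
  rw [Bool.eq_iff_iff, pvSharesB_iff, pvSharesB_iff]; tauto

theorem pvSharesB_of_empty (am : List (String × List String)) {i : Nat}
    (h : (pvAnc am i).isEmpty = true) : ∀ k, pvSharesB am i k = false := by
  intro k
  simp [pvSharesB, List.isEmpty_iff.mp h]

theorem pvSharesB_inter (am : List (String × List String)) (i j : Nat) :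
    pvSharesB am i j = !(PySem.Set.inter (pvAnc am i) (pvAnc am j)).isEmpty := by
  rw [Bool.eq_iff_iff, pvSharesB_iff]
  simp only [Bool.not_eq_true', List.isEmpty_eq_false_iff, ne_eq,
    List.eq_nil_iff_forall_not_mem]
  constructor
  · rintro ⟨a, ha1, ha2⟩ h
    exact h a ((PySem.Set.mem_inter _ _ _).mpr ⟨ha1, ha2⟩)
  · intro h
    by_contra hn
    push Not at hn
    apply h
    intro a ha
    rcases (PySem.Set.mem_inter _ _ _).mp ha with ⟨h1, h2⟩
    exact absurd h2 (by simpa using hn a h1)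

-- row-evolution lemmas
theorem pvP_iff (am : List (String × List String)) (i m x j : Nat) :
    pvP am i m x j = true ↔
      (j ≠ x ∧ pvSharesB am x j = true ∧ (min x j < i ∨ (min x j = i ∧ max x j < m))) := by
  simp [pvP, and_assoc]

theorem pvRow_zero (am : List (String × List String)) (x : Nat) : pvRow am 0 1 x = [] := by
  unfold pvRow
  have : (List.range (pvN am)).filter (pvP am 0 1 x) = [] := by
    rw [List.filter_eq_nil_iff]
    intro k _ hk
    obtain ⟨h1, _, h3⟩ := (pvP_iff am 0 1 x k).mp hk
    omega
  rw [this]; rfl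

theorem pvRow_skip_inner (am : List (String × List String)) {i j : Nat} (hij : i < j)
    (hns : pvSharesB am i j = false) (x : Nat) : pvRow am i (j + 1) x = pvRow am i j x := by
  unfold pvRow
  congr 1
  apply pv_filter_range_congr
  intro k _
  rw [Bool.eq_iff_iff, pvP_iff, pvP_iff]
  constructor
  · rintro ⟨h1, h2, h3⟩
    refine ⟨h1, h2, ?_⟩
    rcases h3 with h3 | ⟨h3, h4⟩
    · exact Or.inl h3
    · by_cases hmax : max x k < j
      · exact Or.inr ⟨h3, hmax⟩
      · exfalso
        have hxk : (x = i ∧ k = j) ∨ (x = j ∧ k = i) := by omega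
        rcases hxk with ⟨hx, hk⟩ | ⟨hx, hk⟩
        · subst hx; subst hk; rw [hns] at h2; exact Bool.false_ne_true h2
        · subst hx; subst hk; rw [pvSharesB_symm, hns] at h2; exact Bool.false_ne_true h2
  · rintro ⟨h1, h2, h3⟩
    exact ⟨h1, h2, by omega⟩

theorem pvRow_step_i (am : List (String × List String)) {i j : Nat} (hij : i < j)
    (hjn : j < pvN am) (hs : pvSharesB am i j = true) :
    pvRow am i (j + 1) i = pvRow am i j i ++ [(pvKeys am).getD j ""] := by
  unfold pvRow
  rw [pv_filter_range_snoc (P := pvP am i j i) (hj := hjn)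
    (hQj := by rw [pvP_iff]; exact ⟨by omega, hs, by omega⟩)
    (hPj := by
      rw [Bool.eq_false_iff]
      intro h
      obtain ⟨h1, _, h3⟩ := (pvP_iff am i j i j).mp h
      omega)
    (hagree := by
      intro k hk
      rw [Bool.eq_iff_iff, pvP_iff, pvP_iff]
      constructor <;> rintro ⟨h1, h2, h3⟩ <;> exact ⟨h1, h2, by omega⟩)
    (hlt := by
      intro k h
      obtain ⟨h1, h2, h3⟩ := (pvP_iff am i j i k).mp h
      omega)]
  rw [List.map_append]
  rfl

theorem pvRow_step_j (am : List (String × List String)) {i j : Nat} (hij : i < j)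
    (hjn : j < pvN am) (hs : pvSharesB am i j = true) :
    pvRow am i (j + 1) j = pvRow am i j j ++ [(pvKeys am).getD i ""] := by
  unfold pvRow
  rw [pv_filter_range_snoc (P := pvP am i j j) (j := i) (hj := by omega)
    (hQj := by rw [pvP_iff]; exact ⟨by omega, by rw [pvSharesB_symm]; exact hs, by omega⟩)
    (hPj := by
      rw [Bool.eq_false_iff]
      intro h
      obtain ⟨h1, h2, h3⟩ := (pvP_iff am i j j i).mp h
      omega)
    (hagree := by
      intro k hk
      rw [Bool.eq_iff_iff, pvP_iff, pvP_iff]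
      constructor <;> rintro ⟨h1, h2, h3⟩ <;> exact ⟨h1, h2, by omega⟩)
    (hlt := by
      intro k h
      obtain ⟨h1, h2, h3⟩ := (pvP_iff am i j j k).mp h
      omega)]
  rw [List.map_append]
  rfl

theorem pvRow_step_other (am : List (String × List String)) {i j x : Nat} (hij : i < j)
    (hxi : x ≠ i) (hxj : x ≠ j) : pvRow am i (j + 1) x = pvRow am i j x := by
  unfold pvRow
  congr 1
  apply pv_filter_range_congr
  intro k _
  rw [Bool.eq_iff_iff, pvP_iff, pvP_iff]
  constructor <;> rintro ⟨h1, h2, h3⟩ <;> exact ⟨h1, h2, by omega⟩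

theorem pvRow_outer_skip (am : List (String × List String)) {i : Nat}
    (h : ∀ k, pvSharesB am i k = false) (x : Nat) :
    pvRow am (i + 1) (i + 2) x = pvRow am i (i + 1) x := by
  unfold pvRow
  congr 1
  apply pv_filter_range_congr
  intro k _
  rw [Bool.eq_iff_iff, pvP_iff, pvP_iff]
  constructor
  · rintro ⟨h1, h2, h3⟩
    refine ⟨h1, h2, ?_⟩
    by_cases hmin : min x k = i
    · exfalso
      have : x = i ∨ k = i := by omega
      rcases this with hx | hk
      · subst hx; rw [h k] at h2; exact Bool.false_ne_true h2
      · subst hk; rw [pvSharesB_symm, h x] at h2; exact Bool.false_ne_true h2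
    · omega
  · rintro ⟨h1, h2, h3⟩
    exact ⟨h1, h2, by omega⟩

theorem pvRow_outer_next (am : List (String × List String)) {i x : Nat} (hx : x < pvN am) :
    pvRow am (i + 1) (i + 2) x = pvRow am i (pvN am) x := by
  unfold pvRow
  congr 1
  apply pv_filter_range_congr
  intro k hk
  rw [Bool.eq_iff_iff, pvP_iff, pvP_iff]
  constructor <;> rintro ⟨h1, h2, h3⟩ <;> exact ⟨h1, h2, by omega⟩

theorem pvRow_fin (am : List (String × List String)) {x : Nat} (hx : x < pvN am) :
    pvRow am (pvN am) (pvN am + 1) x = pvFinRow am x := by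
  unfold pvRow pvFinRow
  congr 1
  apply pv_filter_range_congr
  intro k hk
  rw [Bool.eq_iff_iff, pvP_iff]
  simp only [pvFinP, Bool.and_eq_true, Bool.not_eq_true']
  constructor
  · rintro ⟨h1, h2, h3⟩
    exact ⟨by simpa using h1, h2⟩
  · rintro ⟨h1, h2⟩
    exact ⟨by simpa using h1, h2, by omega⟩

theorem pv_getD_mem (am : List (String × List String)) {x : Nat} (hx : x < pvN am) :
    (pvKeys am).getD x "" ∈ pvKeys am := by
  rw [List.getD_eq_getElem _ _ hx]
  exact List.getElem_mem hx

-- the A-side update step on the dictionary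
theorem pv_stepA_getD (sm : PySem.Dict String (List String)) {ki kj : String} (hij : ki ≠ kj)
    (hkj : kj ∈ sm.keys) (x : String) :
    ((((sm.modify ki [] (· ++ [kj])).setdefault kj []).modify kj [] (· ++ [ki])).getD x []) =
      if x = kj then sm.getD kj [] ++ [ki] else if x = ki then sm.getD ki [] ++ [kj] else sm.getD x [] := by
  have hc : (sm.modify ki [] (· ++ [kj])).contains kj = true := by
    rw [PySem.Dict.contains_iff_mem_keys, PySem.Dict.keys_modify, PySem.Dict.mem_keys_insert]
    exact Or.inr hkj
  rw [PySem.Dict.setdefault_of_contains _ _ hc]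
  by_cases h1 : x = kj
  · subst h1
    simp [PySem.Dict.getD_modify, Ne.symm hij]
  · by_cases h2 : x = ki
    · subst h2
      simp [PySem.Dict.getD_modify, h1]
    · simp [PySem.Dict.getD_modify, h1, h2]

theorem pv_stepA_keys (sm : PySem.Dict String (List String)) {ki kj : String}
    (hki : ki ∈ sm.keys) (hkj : kj ∈ sm.keys) :
    ((((sm.modify ki [] (· ++ [kj])).setdefault kj []).modify kj [] (· ++ [ki])).keys) = sm.keys := by
  have hcki : sm.contains ki = true := (PySem.Dict.contains_iff_mem_keys _ _).mpr hki
  have h1 : (sm.modify ki [] (· ++ [kj])).keys = sm.keys := by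
    rw [PySem.Dict.keys_modify, PySem.Dict.keys_insert_of_contains _ _ hcki]
  have hckj : (sm.modify ki [] (· ++ [kj])).contains kj = true := by
    rw [PySem.Dict.contains_iff_mem_keys, h1]; exact hkj
  rw [PySem.Dict.setdefault_of_contains _ _ hckj, PySem.Dict.keys_modify,
    PySem.Dict.keys_insert_of_contains _ _ hckj, h1]

-- A-side loop invariants
theorem pv_innerA (am : List (String × List String)) {i : Nat} (hi : i < pvN am) :
    ∀ (c m : Nat) (sm : PySem.Dict String (List String)), i < m → m + c = pvN am →
      sm.keys = pvKeys am →
      (∀ x, x < pvN am → sm.getD ((pvKeys am).getD x "") [] = pvRow am i m x) →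
      ((List.range' m c).foldl
          (portA_inner (portA_ancestor_sets (PySem.Dict.ofList am)) (pvKeys am) (pvAnc am i)
            ((pvKeys am).getD i "")) sm).keys = pvKeys am ∧
      ∀ x, x < pvN am →
        ((List.range' m c).foldl
            (portA_inner (portA_ancestor_sets (PySem.Dict.ofList am)) (pvKeys am) (pvAnc am i)
              ((pvKeys am).getD i "")) sm).getD ((pvKeys am).getD x "") [] = pvRow am i (m + c) x := by
  intro c
  induction c with
  | zero =>
    intro m sm him hmc hkeys hrows
    constructor
    · simpa using hkeys
    · intro x hx; simpa using hrows x hx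
  | succ c ih =>
    intro m sm him hmc hkeys hrows
    have hm : m < pvN am := by omega
    rw [List.range'_succ, List.foldl_cons]
    have hstep : (portA_inner (portA_ancestor_sets (PySem.Dict.ofList am)) (pvKeys am) (pvAnc am i)
          ((pvKeys am).getD i "") sm m).keys = pvKeys am ∧
        ∀ x, x < pvN am →
          (portA_inner (portA_ancestor_sets (PySem.Dict.ofList am)) (pvKeys am) (pvAnc am i)
            ((pvKeys am).getD i "") sm m).getD ((pvKeys am).getD x "") [] = pvRow am i (m + 1) x := by
      unfold portA_inner
      rw [pv_ancSets_get? am hm]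
      dsimp only
      by_cases hE : (pvAnc am m).isEmpty
      · rw [hE]
        simp only [if_true]
        have hns : pvSharesB am i m = false := by
          rw [pvSharesB_symm]; exact pvSharesB_of_empty am hE i
        exact ⟨hkeys, fun x hx => by rw [hrows x hx, pvRow_skip_inner am him hns]⟩
      · rw [Bool.not_eq_true] at hE
        rw [hE]
        simp only [Bool.false_eq_true, if_false]
        by_cases hI : (PySem.Set.inter (pvAnc am i) (pvAnc am m)).isEmpty
        · rw [hI]
          simp only [if_true]
          have hns : pvSharesB am i m = false := by rw [pvSharesB_inter, hI]; rfl
          exact ⟨hkeys, fun x hx => by rw [hrows x hx, pvRow_skip_inner am him hns]⟩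
        · rw [Bool.not_eq_true] at hI
          rw [hI]
          simp only [Bool.false_eq_true, if_false]
          have hs : pvSharesB am i m = true := by rw [pvSharesB_inter, hI]; rfl
          have hkij : (pvKeys am).getD i "" ≠ (pvKeys am).getD m "" := by
            intro h; exact absurd (pvKeys_getD_inj am hi hm h) (by omega)
          have hkimem : (pvKeys am).getD i "" ∈ sm.keys := by rw [hkeys]; exact pv_getD_mem am hi
          have hkjmem : (pvKeys am).getD m "" ∈ sm.keys := by rw [hkeys]; exact pv_getD_mem am hm
          refine ⟨by rw [pv_stepA_keys sm hkimem hkjmem]; exact hkeys, ?_⟩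
          intro x hx
          rw [pv_stepA_getD sm hkij hkjmem]
          by_cases hxm : x = m
          · subst hxm
            rw [if_pos rfl, hrows x hx, pvRow_step_j am him hm hs]
          · rw [if_neg (fun h => hxm (pvKeys_getD_inj am hx hm h))]
            by_cases hxi : x = i
            · subst hxi
              rw [if_pos rfl, hrows x hx, pvRow_step_i am him hm hs]
            · rw [if_neg (fun h => hxi (pvKeys_getD_inj am hx hi h)), hrows x hx,
                pvRow_step_other am him hxi hxm]
    have := ih (m + 1)
      (portA_inner (portA_ancestor_sets (PySem.Dict.ofList am)) (pvKeys am) (pvAnc am i)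
        ((pvKeys am).getD i "") sm m)
      (by omega) (by omega) hstep.1 hstep.2
    have harith : m + (c + 1) = (m + 1) + c := by omega
    rw [harith]
    exact this

theorem pv_init_facts (am : List (String × List String)) :
    (portA_init (PySem.Dict.ofList am)).keys = pvKeys am ∧
    ∀ x, x < pvN am → (portA_init (PySem.Dict.ofList am)).getD ((pvKeys am).getD x "") [] = [] := by
  have hfresh : ∀ k ∈ pvKeys am,
      (PySem.Dict.empty : PySem.Dict String (List String)).contains k = false := by
    intro k _; simp [PySem.Dict.contains_empty]
  have hmapnd : ((pvKeys am).map (fun k => k)).Nodup := by simpa using pvKeys_nodup am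
  have hitems : (portA_init (PySem.Dict.ofList am)).items =
      (pvKeys am).map (fun k => (k, ([] : List String))) := by
    have h := PySem.Dict.items_foldl_insert_fresh (pvKeys am) (fun k => k)
      (fun _ => ([] : List String)) PySem.Dict.empty hfresh hmapnd
    unfold portA_init
    simpa using h
  have hkeys : (portA_init (PySem.Dict.ofList am)).keys = pvKeys am := by
    show ((portA_init (PySem.Dict.ofList am)).items.map (fun p => p.1)) = pvKeys am
    rw [hitems]; simp [Function.comp_def]
  refine ⟨hkeys, ?_⟩
  intro x hx
  exact PySem.Dict.getD_of_mem_items _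
    (by rw [hitems]; exact List.mem_map.mpr ⟨(pvKeys am).getD x "", pv_getD_mem am hx, rfl⟩)
    (by rw [hkeys]; exact pvKeys_nodup am) []

theorem pv_outerA (am : List (String × List String)) :
    ∀ k, k ≤ pvN am →
      ((List.range k).foldl
          (portA_outer (portA_ancestor_sets (PySem.Dict.ofList am)) (pvKeys am) (pvN am))
          (portA_init (PySem.Dict.ofList am))).keys = pvKeys am ∧
      ∀ x, x < pvN am →
        ((List.range k).foldl
            (portA_outer (portA_ancestor_sets (PySem.Dict.ofList am)) (pvKeys am) (pvN am))
            (portA_init (PySem.Dict.ofList am))).getD ((pvKeys am).getD x "") [] = pvRow am k (k + 1) x := by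
  intro k
  induction k with
  | zero =>
    intro _
    obtain ⟨h1, h2⟩ := pv_init_facts am
    simp only [List.range_zero, List.foldl_nil]
    exact ⟨h1, fun x hx => by rw [h2 x hx, pvRow_zero]⟩
  | succ k ih =>
    intro hk
    have hkn : k < pvN am := by omega
    obtain ⟨ih1, ih2⟩ := ih (by omega)
    rw [List.range_succ, List.foldl_append, List.foldl_cons, List.foldl_nil]
    unfold portA_outer
    rw [pv_ancSets_get? am hkn]
    dsimp only
    by_cases hE : (pvAnc am k).isEmpty
    · rw [hE]
      simp only [if_true]
      refine ⟨ih1, fun x hx => ?_⟩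
      rw [pvRow_outer_skip am (pvSharesB_of_empty am hE) x]
      exact ih2 x hx
    · rw [Bool.not_eq_true] at hE
      rw [hE]
      simp only [Bool.false_eq_true, if_false]
      obtain ⟨h1, h2⟩ := pv_innerA am hkn (pvN am - (k + 1)) (k + 1) _ (by omega) (by omega) ih1 ih2
      refine ⟨h1, fun x hx => ?_⟩
      rw [pvRow_outer_next am hx]
      have h2x := h2 x hx
      have harith : (k + 1) + (pvN am - (k + 1)) = pvN am := by omega
      rw [harith] at h2x
      exact h2x

theorem pv_portA_eq_spec (am : List (String × List String)) :
    build_sibling_map_from_ancestors_py am = pvSpecOut am := by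
  have hbody : build_sibling_map_from_ancestors_py am =
      ((List.range (pvN am)).foldl
        (portA_outer (portA_ancestor_sets (PySem.Dict.ofList am)) (pvKeys am) (pvN am))
        (portA_init (PySem.Dict.ofList am))).items := rfl
  obtain ⟨h1, h2⟩ := pv_outerA am (pvN am) (le_refl _)
  rw [hbody, PySem.Dict.items_eq_map_keys _ (by rw [h1]; exact pvKeys_nodup am) ([] : List String),
    h1, pv_map_range_getD (pvKeys am) _ ""]
  unfold pvSpecOut
  apply List.map_congr_left
  intro i hi
  have hi2 := List.mem_range.mp hi
  rw [h2 i hi2, pvRow_fin am hi2]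

-- B-side lemmas
def pvL (am : List (String × List String)) : List (String × Nat) :=
  (List.range (pvN am)).flatMap (fun i =>
    ((PySem.Dict.ofList am).getD ((pvKeys am).getD i "") []).map (fun a => (a, i)))

theorem pv_mem_pvL (am : List (String × List String)) (a : String) (x : Nat) :
    (a, x) ∈ pvL am ↔ x < pvN am ∧ a ∈ pvAnc am x := by
  unfold pvL
  simp only [List.mem_flatMap, List.mem_map, List.mem_range, Prod.mk.injEq]
  constructor
  · rintro ⟨i, hi, b, hb, rfl, rfl⟩
    exact ⟨hi, (PySem.Set.mem_ofList _ _).mpr hb⟩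
  · rintro ⟨hx, ha⟩
    exact ⟨x, hx, a, (PySem.Set.mem_ofList _ _).mp ha, rfl, rfl⟩

theorem pv_pos_getD (am : List (String × List String)) {i : Nat} (hi : i < pvN am) :
    (portB_pos (pvKeys am)).getD ((pvKeys am).getD i "") 0 = i := by
  have hkeyseq : pvKeys am = (List.range (pvKeys am).length).map (fun i => (pvKeys am).getD i "") := by
    simpa using pv_map_range_getD (pvKeys am) (fun k => k) ""
  have hfresh : ∀ i ∈ List.range (pvKeys am).length,
      (PySem.Dict.empty : PySem.Dict String Nat).contains ((pvKeys am).getD i "") = false := by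
    intro i _; simp [PySem.Dict.contains_empty]
  have hmapnd : ((List.range (pvKeys am).length).map (fun i => (pvKeys am).getD i "")).Nodup := by
    rw [← hkeyseq]; exact pvKeys_nodup am
  have hitems : (portB_pos (pvKeys am)).items =
      (List.range (pvN am)).map (fun i => ((pvKeys am).getD i "", i)) := by
    unfold portB_pos
    have h := PySem.Dict.items_foldl_insert_fresh (List.range (pvKeys am).length)
      (fun i => (pvKeys am).getD i "") (fun i => i) PySem.Dict.empty hfresh hmapnd
    simpa using h
  have hknd : (portB_pos (pvKeys am)).keys.Nodup := by
    show ((portB_pos (pvKeys am)).items.map (fun p => p.1)).Nodup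
    rw [hitems]
    simp only [List.map_map]
    exact hmapnd
  exact PySem.Dict.getD_of_mem_items _
    (by rw [hitems]; exact List.mem_map.mpr ⟨i, List.mem_range.mpr hi, rfl⟩) hknd 0

theorem pv_groups_eq (am : List (String × List String)) :
    portB_groups (portB_pos (pvKeys am)) (PySem.Dict.ofList am).items =
      (pvL am).foldl (fun g q => g.modify q.1 [] (· ++ [q.2])) PySem.Dict.empty := by
  have hsm : ∀ (g : PySem.Dict String (List Nat)) (a : String) (v : Nat),
      (g.setdefault a []).modify a [] (· ++ [v]) = g.modify a [] (· ++ [v]) := by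
    intro g a v
    by_cases hc : g.contains a
    · rw [PySem.Dict.setdefault_of_contains _ _ hc]
    · rw [PySem.Dict.setdefault_of_not_contains _ _ (by simpa using hc)]
      simp only [PySem.Dict.modify]
      rw [PySem.Dict.getD_insert_self, PySem.Dict.insert_insert_self,
        PySem.Dict.getD_of_not_contains _ _ (by simpa using hc)]
  unfold portB_groups
  rw [PySem.List.foldl_congr_mem _ _
    (fun g p => p.2.foldl
      (fun g a => g.modify a [] (· ++ [(portB_pos (pvKeys am)).getD p.1 0])) g) _
    (by intro acc p _
        exact PySem.List.foldl_congr_mem _ _ _ _ (fun acc2 a _ => hsm acc2 a _))]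
  have hinner : ∀ (p : String × List String) (g : PySem.Dict String (List Nat)),
      p.2.foldl (fun g a => g.modify a [] (· ++ [(portB_pos (pvKeys am)).getD p.1 0])) g =
      (p.2.map (fun a => (a, (portB_pos (pvKeys am)).getD p.1 0))).foldl
        (fun g q => g.modify q.1 [] (· ++ [q.2])) g := by
    intro p g
    rw [List.foldl_map]
  rw [PySem.List.foldl_congr_mem _ _
    (fun g p => ((p.2.map (fun a => (a, (portB_pos (pvKeys am)).getD p.1 0))).foldl
      (fun g q => g.modify q.1 [] (· ++ [q.2])) g)) _
    (by intro acc p _; exact hinner p acc)]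
  rw [← List.foldl_flatMap]
  congr 1
  rw [pv_items_eq am, List.flatMap_map]
  unfold pvL
  apply List.flatMap_congr
  intro i hi
  rw [pv_pos_getD am (List.mem_range.mp hi)]

theorem pv_groups_getD (am : List (String × List String)) (a : String) :
    (portB_groups (portB_pos (pvKeys am)) (PySem.Dict.ofList am).items).getD a [] =
      ((pvL am).filter (fun q => q.1 == a)).map (fun q => q.2) := by
  rw [pv_groups_eq]
  rw [PySem.Dict.getD_foldl_modify_append]
  simp [PySem.Dict.getD_empty]

theorem pv_groups_keys (am : List (String × List String)) :
    (portB_groups (portB_pos (pvKeys am)) (PySem.Dict.ofList am).items).keys =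
      PySem.Set.ofList ((pvL am).map (fun q => q.1)) := by
  rw [pv_groups_eq]
  rw [PySem.Dict.keys_foldl_modify_key (pvL am) (fun q => q.1) [] (fun _ q v => v ++ [q.2])]
  show PySem.Set.update PySem.Dict.empty.keys _ = _
  rw [show (PySem.Dict.empty : PySem.Dict String (List Nat)).keys = [] from rfl,
    PySem.Set.update_nil_left]

theorem pv_sibStep_aux (mset : PySem.Set Nat) (ms : List Nat) :
    ∀ (sb : List (PySem.Set Nat)), (∀ x ∈ ms, x < sb.length) →
      ((ms.foldl (fun sb x => sb.set x (PySem.Set.union (sb.getD x PySem.Set.empty) mset)) sb).length = sb.length) ∧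
      ((∀ y, (sb.getD y PySem.Set.empty).Nodup) →
        ∀ y, ((ms.foldl (fun sb x => sb.set x (PySem.Set.union (sb.getD x PySem.Set.empty) mset)) sb).getD y PySem.Set.empty).Nodup) ∧
      (∀ y k, k ∈ (ms.foldl (fun sb x => sb.set x (PySem.Set.union (sb.getD x PySem.Set.empty) mset)) sb).getD y PySem.Set.empty ↔
        k ∈ sb.getD y PySem.Set.empty ∨ (y ∈ ms ∧ k ∈ mset)) := by
  induction ms with
  | nil => intro sb _; simp
  | cons x ms ih =>
    intro sb hb
    have hx : x < sb.length := hb x List.mem_cons_self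
    have hb' : ∀ z ∈ ms, z < (sb.set x (PySem.Set.union (sb.getD x PySem.Set.empty) mset)).length := by
      intro z hz; rw [List.length_set]; exact hb z (List.mem_cons_of_mem _ hz)
    obtain ⟨L, N, M⟩ := ih (sb.set x (PySem.Set.union (sb.getD x PySem.Set.empty) mset)) hb'
    rw [List.foldl_cons]
    refine ⟨by rw [L, List.length_set], ?_, ?_⟩
    · intro h
      apply N
      intro y
      by_cases hyx : y = x
      · subst hyx
        rw [pv_getD_set_self _ _ _ _ hx]
        exact PySem.Set.nodup_union _ _ (h y)
      · rw [pv_getD_set_ne _ _ _ _ _ hyx]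
        exact h y
    · intro y k
      rw [M y k]
      by_cases hyx : y = x
      · subst hyx
        rw [pv_getD_set_self _ _ _ _ hx]
        rw [PySem.Set.mem_union]
        simp only [List.mem_cons]
        tauto
      · rw [pv_getD_set_ne _ _ _ _ _ hyx]
        simp only [List.mem_cons]
        tauto

theorem pv_sib_fold (M : List (List Nat)) :
    ∀ (sb : List (PySem.Set Nat)),
      (∀ mem ∈ M, ∀ x ∈ mem, x < sb.length) →
      (∀ y, (sb.getD y PySem.Set.empty).Nodup) →
      (M.foldl portB_sibStep sb).length = sb.length ∧
      (∀ y, ((M.foldl portB_sibStep sb).getD y PySem.Set.empty).Nodup) ∧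
      ∀ y k, k ∈ (M.foldl portB_sibStep sb).getD y PySem.Set.empty ↔
        k ∈ sb.getD y PySem.Set.empty ∨ ∃ mem ∈ M, y ∈ mem ∧ k ∈ mem := by
  induction M with
  | nil =>
    intro sb _ hnd
    exact ⟨rfl, by simpa using hnd, by simp⟩
  | cons mem M ih =>
    intro sb hb hnd
    have hbm : ∀ x ∈ mem, x < sb.length := hb mem List.mem_cons_self
    obtain ⟨L1, N1, M1⟩ := pv_sibStep_aux (PySem.Set.ofList mem) mem sb hbm
    have hstep : portB_sibStep sb mem =
        mem.foldl (fun sb x => sb.set x (PySem.Set.union (sb.getD x PySem.Set.empty)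
          (PySem.Set.ofList mem))) sb := rfl
    rw [List.foldl_cons]
    have hb' : ∀ m ∈ M, ∀ x ∈ m, x < (portB_sibStep sb mem).length := by
      intro m hm x hxm
      rw [hstep, L1]
      exact hb m (List.mem_cons_of_mem _ hm) x hxm
    obtain ⟨L2, N2, M2⟩ := ih (portB_sibStep sb mem) hb' (by rw [hstep]; exact N1 hnd)
    refine ⟨by rw [L2, hstep, L1], N2, ?_⟩
    intro y k
    rw [M2 y k, hstep, M1 y k, PySem.Set.mem_ofList]
    simp only [List.mem_cons]
    constructor
    · rintro ((h | ⟨h1, h2⟩) | ⟨m, hm, h1, h2⟩)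
      · exact Or.inl h
      · exact Or.inr ⟨mem, Or.inl rfl, h1, h2⟩
      · exact Or.inr ⟨m, Or.inr hm, h1, h2⟩
    · rintro (h | ⟨m, (rfl | hm), h1, h2⟩)
      · exact Or.inl (Or.inl h)
      · exact Or.inl (Or.inr ⟨h1, h2⟩)
      · exact Or.inr ⟨m, hm, h1, h2⟩

theorem pv_portB_eq_spec (am : List (String × List String)) :
    build_sibling_map_from_ancestors_py_alt am = pvSpecOut am := by
  have hgnd : (portB_groups (portB_pos (pvKeys am)) (PySem.Dict.ofList am).items).keys.Nodup := by
    rw [pv_groups_keys]; exact PySem.Set.nodup_ofList _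
  have hgrp : ∀ (a : String) (x : Nat),
      x ∈ (portB_groups (portB_pos (pvKeys am)) (PySem.Dict.ofList am).items).getD a [] ↔
        x < pvN am ∧ a ∈ pvAnc am x := by
    intro a x
    rw [pv_groups_getD]
    simp only [List.mem_map, List.mem_filter]
    constructor
    · rintro ⟨⟨q1, q2⟩, ⟨hqL, hqa⟩, rfl⟩
      simp only [beq_iff_eq] at hqa
      subst hqa
      exact (pv_mem_pvL am _ _).mp hqL
    · rintro ⟨hx, ha⟩
      exact ⟨(a, x), ⟨(pv_mem_pvL am a x).mpr ⟨hx, ha⟩, by simp⟩, rfl⟩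
  have hmemM : ∀ (y k : Nat),
      (∃ mem ∈ (portB_groups (portB_pos (pvKeys am)) (PySem.Dict.ofList am).items).values,
        y ∈ mem ∧ k ∈ mem) ↔
      (y < pvN am ∧ k < pvN am ∧ pvSharesB am y k = true) := by
    intro y k
    rw [PySem.Dict.values_eq_map_keys _ hgnd []]
    constructor
    · rintro ⟨mem, hmem, hy, hk⟩
      obtain ⟨a, _, rfl⟩ := List.mem_map.mp hmem
      obtain ⟨hy1, hy2⟩ := (hgrp a y).mp hy
      obtain ⟨hk1, hk2⟩ := (hgrp a k).mp hk
      exact ⟨hy1, hk1, (pvSharesB_iff am y k).mpr ⟨a, hy2, hk2⟩⟩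
    · rintro ⟨hy, hk, hs⟩
      obtain ⟨a, ha1, ha2⟩ := (pvSharesB_iff am y k).mp hs
      have haK : a ∈ (portB_groups (portB_pos (pvKeys am)) (PySem.Dict.ofList am).items).keys := by
        rw [pv_groups_keys, PySem.Set.mem_ofList]
        exact List.mem_map.mpr ⟨(a, y), (pv_mem_pvL am a y).mpr ⟨hy, ha1⟩, rfl⟩
      refine ⟨(portB_groups (portB_pos (pvKeys am)) (PySem.Dict.ofList am).items).getD a [],
        List.mem_map.mpr ⟨a, haK, rfl⟩, (hgrp a y).mpr ⟨hy, ha1⟩, (hgrp a k).mpr ⟨hk, ha2⟩⟩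
  have hsib0 : ∀ y, ((pvKeys am).map (fun _ => (PySem.Set.empty : PySem.Set Nat))).getD y
      PySem.Set.empty = PySem.Set.empty := by
    intro y
    rw [List.getD_eq_getElem?_getD, List.getElem?_map]
    cases (pvKeys am)[y]? <;> rfl
  have hbound : ∀ mem ∈ (portB_groups (portB_pos (pvKeys am)) (PySem.Dict.ofList am).items).values,
      ∀ x ∈ mem, x < ((pvKeys am).map (fun _ => (PySem.Set.empty : PySem.Set Nat))).length := by
    intro mem hmem x hx
    rw [List.length_map]
    rw [PySem.Dict.values_eq_map_keys _ hgnd []] at hmem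
    obtain ⟨a, _, rfl⟩ := List.mem_map.mp hmem
    exact ((hgrp a x).mp hx).1
  obtain ⟨hlen, hnd, hmem⟩ := pv_sib_fold
    (portB_groups (portB_pos (pvKeys am)) (PySem.Dict.ofList am).items).values
    ((pvKeys am).map (fun _ => (PySem.Set.empty : PySem.Set Nat))) hbound
    (fun y => by rw [hsib0 y]; exact List.nodup_nil)
  have hbody : build_sibling_map_from_ancestors_py_alt am =
      (List.range (pvN am)).map (fun i =>
        ((pvKeys am).getD i "",
         (PySem.List.sorted (PySem.Set.diff
           (((portB_groups (portB_pos (pvKeys am)) (PySem.Dict.ofList am).items).values.foldl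
             portB_sibStep ((pvKeys am).map (fun _ => PySem.Set.empty))).getD i PySem.Set.empty) [i])
           (fun x => x) false).map (fun j => (pvKeys am).getD j ""))) := rfl
  rw [hbody]
  unfold pvSpecOut
  apply List.map_congr_left
  intro i hi
  have hin := List.mem_range.mp hi
  have hrow : PySem.List.sorted (PySem.Set.diff
      (((portB_groups (portB_pos (pvKeys am)) (PySem.Dict.ofList am).items).values.foldl
        portB_sibStep ((pvKeys am).map (fun _ => PySem.Set.empty))).getD i PySem.Set.empty) [i])
      (fun x => x) false = (List.range (pvN am)).filter (pvFinP am i) := by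
    apply PySem.List.sorted_eq_of_perm_of_pairwise_lt
    · rw [List.perm_ext_iff_of_nodup (List.Nodup.filter _ List.nodup_range)
        (PySem.Set.nodup_diff _ _ (hnd i))]
      intro k
      rw [List.mem_filter, List.mem_range, PySem.Set.mem_diff, hmem i k, hsib0 i]
      simp only [show (PySem.Set.empty : PySem.Set Nat) = [] from rfl, List.not_mem_nil,
        false_or, List.mem_singleton]
      rw [hmemM i k]
      constructor
      · rintro ⟨hk, hP⟩
        simp only [pvFinP, Bool.and_eq_true] at hP
        exact ⟨⟨hin, hk, hP.2⟩, by simpa using hP.1⟩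
      · rintro ⟨⟨_, hk, hs⟩, hki⟩
        refine ⟨hk, ?_⟩
        simp only [pvFinP, Bool.and_eq_true]
        exact ⟨by simpa using hki, hs⟩
    · simpa using List.Pairwise.filter (pvFinP am i) (List.pairwise_lt_range (n := pvN am))
  rw [hrow]
  rfl

-- ===== VERDICT (by name: the statement is the Claim_ definition above) =====
theorem build_sibling_map_from_ancestors_py_spec : Claim_equal_build_sibling_map_from_ancestors_py := by
  intro am _
  unfold Spec_build_sibling_map_from_ancestors_py
  rw [pv_portA_eq_spec, pv_portB_eq_spec]
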